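-- pv_equiv track=rewrite | github.com/khyledhanani/holosoma | src/holosoma_retargeting/holosoma_retargeting/src/dual_interaction_mesh_retargeter.py | _extract_lr_flags
-- ===== SOURCE A (Python) =====
-- def _extract_lr_flags(flags: dict[str, bool]) -> tuple[bool, bool]:
--     left = False
--     right = False
--     for k, v in flags.items():
--         lk = k.lower()
--         if lk.startswith("l") or "left" in lk:
--             left = bool(v)
--         if lk.startswith("r") or "right" in lk:
--             right = bool(v)
--     return left, right
-- ===== SOURCE B (Python) =====
-- def _extract_lr_flags(flags: dict[str, bool]) -> tuple[bool, bool]: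
--     items = list(reversed(list(flags.items())))
--     left = next((bool(v) for k, v in items
--                  if k.lower().startswith("l") or "left" in k.lower()), False)
--     right = next((bool(v) for k, v in items
--                   if k.lower().startswith("r") or "right" in k.lower()), False)
--     return left, right
-- ===== Notes on version B (the rewrite author's own statement) =====
-- stated objective: alternative
-- what changed: Replaces the single fused accumulator loop over all items by two independent reverse scans that each stop at the first (i.e. last-in-order) key matching that flag's predicate, defaulting to False.
import Mathlib
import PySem

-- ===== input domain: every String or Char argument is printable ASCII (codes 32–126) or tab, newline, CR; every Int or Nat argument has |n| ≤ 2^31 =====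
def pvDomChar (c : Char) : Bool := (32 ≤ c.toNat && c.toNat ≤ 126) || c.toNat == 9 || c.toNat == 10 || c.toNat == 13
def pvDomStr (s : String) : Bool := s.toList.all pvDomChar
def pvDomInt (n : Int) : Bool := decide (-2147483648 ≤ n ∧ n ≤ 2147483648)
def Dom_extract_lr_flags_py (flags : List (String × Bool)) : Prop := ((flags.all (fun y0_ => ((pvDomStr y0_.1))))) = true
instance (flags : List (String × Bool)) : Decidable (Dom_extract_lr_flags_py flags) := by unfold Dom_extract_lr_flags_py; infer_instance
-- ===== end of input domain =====

-- B replaces the fused accumulator loop by two independent reverse-scan first-match passes (alternative decomposition, same cost).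

-- ===== PORT A =====
def extract_lr_flags_py (flags : List (String × Bool)) : Bool × Bool :=
  flags.foldl
    (fun (lr : Bool × Bool) kv =>
      let lk := PySem.Str.lower kv.1
      let l := if PySem.Str.startswith lk "l" || PySem.Str.isIn "left" lk then kv.2 else lr.1
      let r := if PySem.Str.startswith lk "r" || PySem.Str.isIn "right" lk then kv.2 else lr.2
      (l, r))
    (false, false)

-- ===== PORT B =====
def pvLeftPred (k : String) : Bool :=
  PySem.Str.startswith (PySem.Str.lower k) "l" || PySem.Str.isIn "left" (PySem.Str.lower k)

def pvRightPred (k : String) : Bool :=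
  PySem.Str.startswith (PySem.Str.lower k) "r" || PySem.Str.isIn "right" (PySem.Str.lower k)

def extract_lr_flags_py_alt (flags : List (String × Bool)) : Bool × Bool :=
  let items := flags.reverse
  (((items.find? (fun kv => pvLeftPred kv.1)).map Prod.snd).getD false,
   ((items.find? (fun kv => pvRightPred kv.1)).map Prod.snd).getD false)

-- ===== PRECONDITION & SPEC =====
def Spec_extract_lr_flags_py (flags : List (String × Bool)) (out : Bool × Bool) : Prop := out = extract_lr_flags_py_alt flags
instance (flags : List (String × Bool)) (out : Bool × Bool) : Decidable (Spec_extract_lr_flags_py flags out) := by unfold Spec_extract_lr_flags_py; infer_instance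

-- ===== CLAIM (what is proved, stated in full; the proofs are below) =====
def Claim_equal_extract_lr_flags_py : Prop := ∀ (flags : List (String × Bool)), Dom_extract_lr_flags_py flags → Spec_extract_lr_flags_py flags (extract_lr_flags_py flags)

-- ===== LEMMAS AND PROOFS =====

theorem extract_lr_flags_eq (flags : List (String × Bool)) :
    extract_lr_flags_py flags = extract_lr_flags_py_alt flags := by
  induction flags using List.reverseRecOn with
  | nil => rfl
  | append_singleton xs x ih =>
    simp only [extract_lr_flags_py, List.foldl_append, List.foldl_cons, List.foldl_nil] at *
    simp only [extract_lr_flags_py_alt, List.reverse_append, List.reverse_cons,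
      List.reverse_nil, List.nil_append, List.singleton_append, List.find?_cons] at *
    rw [ih]
    show (if pvLeftPred x.1 then x.2 else _, if pvRightPred x.1 then x.2 else _) = _
    cases hl : pvLeftPred x.1 <;> cases hr : pvRightPred x.1 <;> simp [hl, hr]

-- ===== VERDICT (by name: the statement is the Claim_ definition above) =====
theorem extract_lr_flags_py_spec : Claim_equal_extract_lr_flags_py := by
  intro flags _
  exact (extract_lr_flags_eq flags).symm ▸ rfl
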